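-- pv_equiv track=rewrite | github.com/rapidsai/cuvs | cpp/src/neighbors/ivf_flat/jit_lto_kernels/generate_kernels.py | parse_template_parameters
-- ===== SOURCE A (Python) =====
-- def parse_template_parameters(template_str):
--     """Parse template parameters from a template string with nested templates."""
--     params = []
--     current_param = ''
--     depth = 0
--
--     for char in template_str:
--         if char == '<':
--             depth += 1
--         elif char == '>':
--             depth -= 1
--         elif char == ',' and depth == 0:
--             params.append(current_param.strip())
--             current_param = ''
--             continue
--         current_param += char
--
--     if current_param:
--         params.append(current_param.strip())
--
--     return params
-- ===== SOURCE B (Python) =====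
-- def _split_top(s, depth):
--     # find the first top-level comma; slice there and recurse on the rest
--     for i, ch in enumerate(s):
--         if ch == '<':
--             depth += 1
--         elif ch == '>':
--             depth -= 1
--         elif ch == ',' and depth == 0:
--             return [s[:i]] + _split_top(s[i + 1:], 0)
--     return [s]
--
--
-- def parse_template_parameters(template_str):
--     raw = _split_top(template_str, 0)
--     if raw[-1] == '':
--         raw.pop()
--     return [seg.strip() for seg in raw]
-- ===== Notes on version B (the rewrite author's own statement) =====
-- stated objective: alternative
-- what changed: A builds each parameter char-by-char in one accumulator loop; B recursively finds the first top-level comma, slices the string there, recurses on the remainder, then drops a raw-empty trailing segment and strips each slice.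
import Mathlib
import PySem

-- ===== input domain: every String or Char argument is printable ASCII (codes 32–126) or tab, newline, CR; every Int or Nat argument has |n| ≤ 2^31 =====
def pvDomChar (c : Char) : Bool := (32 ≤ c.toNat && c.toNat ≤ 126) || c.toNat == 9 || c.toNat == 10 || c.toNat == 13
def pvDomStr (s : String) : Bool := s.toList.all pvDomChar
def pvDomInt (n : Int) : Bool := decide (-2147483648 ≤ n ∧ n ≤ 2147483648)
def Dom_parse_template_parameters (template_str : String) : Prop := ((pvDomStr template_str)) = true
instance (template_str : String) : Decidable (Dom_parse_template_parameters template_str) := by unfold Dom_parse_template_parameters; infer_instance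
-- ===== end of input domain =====

-- B replaces A's char-by-char accumulator loop by a recursive "find first top-level comma,
-- slice, recurse" split followed by a drop-trailing-empty + strip pass (objective: alternative).


-- ===== PORT A =====
-- current_param is kept as a List Char (Python builds the string char by char);
-- .strip() is PySem.Chars.strip, exact on the ASCII domain.
-- the body of A's for-loop (state = (params, current_param, depth)):
def pvAStep (acc : List String × List Char × Int) (c : Char) : List String × List Char × Int :=
  if c = '<' then (acc.1, acc.2.1 ++ [c], acc.2.2 + 1)
  else if c = '>' then (acc.1, acc.2.1 ++ [c], acc.2.2 - 1)
  else if c = ',' ∧ acc.2.2 = 0 then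
    (acc.1 ++ [String.mk (PySem.Chars.strip acc.2.1)], [], acc.2.2)
  else (acc.1, acc.2.1 ++ [c], acc.2.2)

def parse_template_parameters (template_str : String) : List String :=
  let st := template_str.toList.foldl pvAStep ([], [], 0)
  if st.2.1 ≠ [] then st.1 ++ [String.mk (PySem.Chars.strip st.2.1)] else st.1

-- ===== PORT B =====
-- transliteration of Source B on template_str.toList: s[:i] ↦ take i, s[i+1:] ↦ drop (i+1).
-- the for/enumerate scan of _split_top that finds the first top-level comma index:
def pvFindCut (depth : Int) (i : Nat) (s : List Char) : Option Nat :=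
  match s with
  | [] => none
  | c :: r =>
    if c = '<' then pvFindCut (depth + 1) (i + 1) r
    else if c = '>' then pvFindCut (depth - 1) (i + 1) r
    else if c = ',' ∧ depth = 0 then some i
    else pvFindCut depth (i + 1) r

theorem pvFindCut_nil_none (d : Int) (i : Nat) : pvFindCut d i [] = none := rfl

def pvSplitTop (s : List Char) (depth : Int) : List (List Char) :=
  match h : pvFindCut depth 0 s with
  | none => [s]
  | some i => s.take i :: pvSplitTop (s.drop (i + 1)) 0
termination_by s.length
decreasing_by
  cases s with
  | nil => simp [pvFindCut_nil_none] at h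
  | cons c r => simp

def parse_template_parameters_alt (template_str : String) : List String :=
  let raw := pvSplitTop template_str.toList 0
  let raw2 := if raw.getLast? = some [] then raw.dropLast else raw
  raw2.map (fun seg => String.mk (PySem.Chars.strip seg))

-- ===== PRECONDITION & SPEC =====
def Spec_parse_template_parameters (template_str : String) (out : List String) : Prop := out = parse_template_parameters_alt template_str
instance (template_str : String) (out : List String) : Decidable (Spec_parse_template_parameters template_str out) := by unfold Spec_parse_template_parameters; infer_instance

-- ===== CLAIM (what is proved, stated in full; the proofs are below) =====
def Claim_equal_parse_template_parameters : Prop := ∀ (template_str : String), Dom_parse_template_parameters template_str → Spec_parse_template_parameters template_str (parse_template_parameters template_str)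

-- ===== LEMMAS AND PROOFS =====

-- unfolding lemmas for pvSplitTop
theorem pvSplitTop_eq_none {s : List Char} {d : Int} (h : pvFindCut d 0 s = none) :
    pvSplitTop s d = [s] := by
  rw [pvSplitTop]; split <;> simp_all

theorem pvSplitTop_eq_some {s : List Char} {d : Int} {i : Nat} (h : pvFindCut d 0 s = some i) :
    pvSplitTop s d = s.take i :: pvSplitTop (s.drop (i + 1)) 0 := by
  rw [pvSplitTop]; split <;> simp_all

theorem pvSplitTop_ne_nil (s : List Char) (d : Int) : pvSplitTop s d ≠ [] := by
  cases h : pvFindCut d 0 s with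
  | none => rw [pvSplitTop_eq_none h]; simp
  | some i => rw [pvSplitTop_eq_some h]; simp

-- common specification both sides are reduced to: strip every raw segment,
-- dropping the last one exactly when it is raw-empty
def pvProcess : List (List Char) → List String
  | [] => []
  | [c] => if c ≠ [] then [String.mk (PySem.Chars.strip c)] else []
  | c :: r :: t => String.mk (PySem.Chars.strip c) :: pvProcess (r :: t)

theorem pvProcess_cons (c : List Char) {r : List (List Char)} (h : r ≠ []) :
    pvProcess (c :: r) = String.mk (PySem.Chars.strip c) :: pvProcess r := by
  cases r with
  | nil => exact absurd rfl h
  | cons x t => rfl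

theorem pvFindCut_shift (s : List Char) (d : Int) (i : Nat) :
    pvFindCut d i s = (pvFindCut d 0 s).map (· + i) := by
  induction s generalizing d i with
  | nil => rfl
  | cons c r ih =>
    simp only [pvFindCut]
    split_ifs with h1 h2 h3
    · rw [ih, ih (i := 1)]; cases pvFindCut (d+1) 0 r <;> simp; omega
    · rw [ih, ih (i := 1)]; cases pvFindCut (d-1) 0 r <;> simp; omega
    · simp
    · rw [ih, ih (i := 1)]; cases pvFindCut d 0 r <;> simp; omega

-- the new depth after A processes character c at depth d
def pvStep (d : Int) (c : Char) : Int :=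
  if c = '<' then d + 1 else if c = '>' then d - 1 else d

theorem pvAStep_comma (ps : List String) (cur : List Char) :
    pvAStep (ps, cur, 0) ',' = (ps ++ [String.mk (PySem.Chars.strip cur)], [], 0) := by
  simp [pvAStep]

theorem pvAStep_other (ps : List String) (cur : List Char) (d : Int) (c : Char)
    (h : ¬(c = ',' ∧ d = 0)) :
    pvAStep (ps, cur, d) c = (ps, cur ++ [c], pvStep d c) := by
  simp only [pvAStep, pvStep]
  split_ifs with h1 h2 <;> simp_all

theorem pvSplitTop_comma (r : List Char) :
    pvSplitTop (',' :: r) 0 = [] :: pvSplitTop r 0 := by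
  have hf : pvFindCut 0 0 (',' :: r) = some 0 := by simp [pvFindCut]
  rw [pvSplitTop_eq_some hf]
  simp

theorem pvSplitTop_cons (c : Char) (r : List Char) (d : Int) (h : ¬(c = ',' ∧ d = 0)) :
    pvSplitTop (c :: r) d = (pvSplitTop r (pvStep d c)).modifyHead (c :: ·) := by
  have hf : pvFindCut d 0 (c :: r) = (pvFindCut (pvStep d c) 0 r).map (· + 1) := by
    simp only [pvFindCut, pvStep]
    split_ifs with h1 h2 <;> rw [pvFindCut_shift]
  cases hr : pvFindCut (pvStep d c) 0 r with
  | none =>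
    rw [pvSplitTop_eq_none (by simp [hf, hr]), pvSplitTop_eq_none hr]
    rfl
  | some i =>
    rw [pvSplitTop_eq_some (show pvFindCut d 0 (c :: r) = some (i + 1) by simp [hf, hr]),
        pvSplitTop_eq_some hr]
    simp [List.take_succ_cons, List.drop_succ_cons]

-- A's loop invariant: running the fold from state (ps, cur, d) and finalizing
-- equals ps ++ the processed split of the remaining input with cur prepended to its head
theorem pvA_invariant (cs : List Char) (ps : List String) (cur : List Char) (d : Int) :
    (let st := cs.foldl pvAStep (ps, cur, d)
     if st.2.1 ≠ [] then st.1 ++ [String.mk (PySem.Chars.strip st.2.1)] else st.1)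
    = ps ++ pvProcess ((pvSplitTop cs d).modifyHead (cur ++ ·)) := by
  induction cs generalizing ps cur d with
  | nil =>
    rw [pvSplitTop_eq_none (pvFindCut_nil_none d 0)]
    simp only [List.foldl_nil, List.modifyHead, pvProcess, List.append_nil]
    split_ifs with h <;> simp_all
  | cons c r ih =>
    by_cases hc : c = ',' ∧ d = 0
    · obtain ⟨hc1, hd⟩ := hc
      subst hc1; subst hd
      simp only [List.foldl_cons, pvAStep_comma]
      rw [ih, pvSplitTop_comma]
      simp only [List.modifyHead, List.nil_append, List.append_nil]
      have hne := pvSplitTop_ne_nil r 0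
      rw [pvProcess_cons cur hne]
      cases hsp : pvSplitTop r 0 with
      | nil => exact absurd hsp hne
      | cons x t => simp
    · simp only [List.foldl_cons, pvAStep_other ps cur d c hc]
      rw [ih, pvSplitTop_cons c r d hc]
      cases hsp : pvSplitTop r (pvStep d c) with
      | nil => exact absurd hsp (pvSplitTop_ne_nil r _)
      | cons x t => simp [List.modifyHead]

-- B's drop-last-if-empty + map strip equals pvProcess, for any nonempty segment list
theorem pvB_process (segs : List (List Char)) (h : segs ≠ []) :
    ((if segs.getLast? = some [] then segs.dropLast else segs).map
      (fun seg => String.mk (PySem.Chars.strip seg))) = pvProcess segs := by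
  induction segs with
  | nil => exact absurd rfl h
  | cons c r ih =>
    cases r with
    | nil =>
      simp only [pvProcess, List.getLast?_singleton, List.dropLast_singleton]
      split_ifs with h1 h2 <;> simp_all
    | cons x t =>
      have hr : (x :: t : List (List Char)) ≠ [] := by simp
      rw [pvProcess_cons c hr, ← ih hr]
      rw [List.getLast?_cons_cons]
      split_ifs with h1 <;> simp

-- ===== VERDICT (by name: the statement is the Claim_ definition above) =====
theorem parse_template_parameters_spec : Claim_equal_parse_template_parameters := by
  intro s _
  unfold Spec_parse_template_parameters parse_template_parameters parse_template_parameters_alt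
  rw [pvB_process _ (pvSplitTop_ne_nil _ _)]
  have := pvA_invariant s.toList [] [] 0
  simp only [List.nil_append] at this ⊢
  rw [this]
  congr 1
  cases hsp : pvSplitTop s.toList 0 <;> simp [List.modifyHead]
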